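-- pv_equiv track=rewrite | github.com/eelut/A2SV | A2SV Special Mini Contest 09-May-2025/A - Stairway to Goodness 351764.py | max_good_array_length
-- ===== SOURCE A (Python) =====
-- def max_good_array_length(l, r):
--     low, high = 1, 44722  # sqrt(2e9)
--     res = 1
--     while low <= high:
--         mid = (low + high) // 2
--         total = l + (mid - 1) * mid // 2
--         if total <= r:
--             res = mid
--             low = mid + 1
--         else:
--             high = mid - 1
--     return res
-- ===== SOURCE B (Python) =====
-- def max_good_array_length(l, r):
--     res = 1
--     k = 1
--     while k <= 44722 and l + (k - 1) * k // 2 <= r: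
--         res = k
--         k += 1
--     return res
-- ===== Notes on version B (the rewrite author's own statement) =====
-- stated objective: simpler
-- what changed: Replaced the binary search over [1,44722] (low/high/mid bookkeeping) with a plain linear forward scan that advances k while the sum l+(k-1)k//2 still fits in r, keeping the same 44722 cap and the default of 1.
import Mathlib
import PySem

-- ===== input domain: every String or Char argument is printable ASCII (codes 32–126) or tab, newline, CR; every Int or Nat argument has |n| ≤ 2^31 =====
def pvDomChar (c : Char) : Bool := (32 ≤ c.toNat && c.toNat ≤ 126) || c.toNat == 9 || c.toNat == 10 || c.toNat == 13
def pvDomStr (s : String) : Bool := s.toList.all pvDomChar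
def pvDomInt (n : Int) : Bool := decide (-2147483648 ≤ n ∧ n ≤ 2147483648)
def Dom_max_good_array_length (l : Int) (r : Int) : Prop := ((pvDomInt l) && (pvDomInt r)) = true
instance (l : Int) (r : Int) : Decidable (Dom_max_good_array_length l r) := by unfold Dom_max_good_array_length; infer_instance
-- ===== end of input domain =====

-- B replaces A's binary search by a plain linear forward scan with the same 44722 cap; objective: simpler.

-- ===== PORT A =====
-- A's while-loop over (low, high, res): the binary search; mid = (low+high)//2 and
-- total = l + (mid-1)*mid//2 are written inline where Python names them.
def mgalALoop (l r low high res : Int) : Int :=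
  if h : low ≤ high then
    if l + PySem.Int.floordiv ((PySem.Int.floordiv (low + high) 2 - 1) * PySem.Int.floordiv (low + high) 2) 2 ≤ r then
      mgalALoop l r (PySem.Int.floordiv (low + high) 2 + 1) high (PySem.Int.floordiv (low + high) 2)
    else
      mgalALoop l r low (PySem.Int.floordiv (low + high) 2 - 1) res
  else res
termination_by (high + 1 - low).toNat
decreasing_by
  · have hb := PySem.Int.floordiv_two_mid_bounds h
    omega
  · have hb := PySem.Int.floordiv_two_mid_bounds h
    omega

def max_good_array_length (l : Int) (r : Int) : Int :=
  mgalALoop l r 1 44722 1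

-- ===== PORT B =====
-- B's while-loop: linear scan k = 1, 2, … while k ≤ 44722 and the total still fits.
def mgalBLoop (l r k res : Int) : Int :=
  if h : k ≤ 44722 ∧ l + PySem.Int.floordiv ((k - 1) * k) 2 ≤ r then
    mgalBLoop l r (k + 1) k
  else res
termination_by (44723 - k).toNat
decreasing_by omega

def max_good_array_length_alt (l : Int) (r : Int) : Int :=
  mgalBLoop l r 1 1

-- ===== PRECONDITION & SPEC =====
def Spec_max_good_array_length (l : Int) (r : Int) (out : Int) : Prop := out = max_good_array_length_alt l r
instance (l : Int) (r : Int) (out : Int) : Decidable (Spec_max_good_array_length l r out) := by unfold Spec_max_good_array_length; infer_instance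

-- ===== CLAIM (what is proved, stated in full; the proofs are below) =====
def Claim_equal_max_good_array_length : Prop := ∀ (l : Int) (r : Int), Dom_max_good_array_length l r → Spec_max_good_array_length l r (max_good_array_length l r)

-- ===== LEMMAS AND PROOFS =====

-- The predicate both programs test: an array of length k starting at l fits below r.
def mgalP (l r k : Int) : Prop := l + PySem.Int.floordiv ((k - 1) * k) 2 ≤ r

-- mgalP is downward closed on [1, ∞)
theorem mgalP_mono {l r j k : Int} (h1 : 1 ≤ j) (hjk : j ≤ k) (hk : mgalP l r k) :
    mgalP l r j := by
  unfold mgalP at *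
  rw [PySem.Int.floordiv_eq_ediv_of_pos (by omega)] at *
  have hmul : (j - 1) * j ≤ (k - 1) * k := by nlinarith
  have := Int.ediv_le_ediv (by omega : (0:Int) < 2) hmul
  omega

-- Characterisation of the common answer.
def mgalIsAns (l r n : Int) : Prop :=
  1 ≤ n ∧ n ≤ 44722 ∧ (mgalP l r n ∨ n = 1) ∧
  ∀ k, n < k → k ≤ 44722 → ¬ mgalP l r k

theorem mgalIsAns_unique {l r m n : Int} (hm : mgalIsAns l r m) (hn : mgalIsAns l r n) :
    m = n := by
  obtain ⟨hm1, hm2, hm3, hm4⟩ := hm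
  obtain ⟨hn1, hn2, hn3, hn4⟩ := hn
  rcases lt_trichotomy m n with h | h | h
  · rcases hn3 with hp | h1
    · exact absurd hp (hm4 n h hn2)
    · omega
  · exact h
  · rcases hm3 with hp | h1
    · exact absurd hp (hn4 m h hm2)
    · omega

theorem mgalALoop_isAns (l r : Int) :
    ∀ (n : Nat) (low high res : Int), (high + 1 - low).toNat = n →
      1 ≤ low → low ≤ high + 1 → high ≤ 44722 →
      res ≤ low → 1 ≤ res → res ≤ 44722 →
      (mgalP l r res ∨ res = 1) →
      (∀ k, 1 ≤ k → k < low → mgalP l r k → k ≤ res) →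
      (∀ k, high < k → k ≤ 44722 → ¬ mgalP l r k) →
      mgalIsAns l r (mgalALoop l r low high res) := by
  intro n
  induction n using Nat.strong_induction_on with
  | _ n ih =>
    intro low high res hn h1 h2 h3 h4 h5 h6 h7 h8 h9
    rw [mgalALoop]
    by_cases h : low ≤ high
    · rw [dif_pos h]
      have hb := PySem.Int.floordiv_two_mid_bounds h
      set mid := PySem.Int.floordiv (low + high) 2 with hmid
      by_cases hle : l + PySem.Int.floordiv ((mid - 1) * mid) 2 ≤ r
      · rw [if_pos hle]
        refine ih ((high + 1 - (mid + 1)).toNat) (by omega) (mid + 1) high mid rfl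
          (by omega) (by omega) h3 (by omega) (by omega) (by omega)
          (Or.inl hle) ?_ h9
        intro k hk1 hk2 hp; omega
      · rw [if_neg hle]
        refine ih ((mid - 1 + 1 - low).toNat) (by omega) low (mid - 1) res rfl
          h1 (by omega) (by omega) h4 h5 h6 h7 h8 ?_
        intro k hk hk2 hp
        by_cases hkh : high < k
        · exact h9 k hkh hk2 hp
        · exact hle (mgalP_mono (by omega) (by omega : mid ≤ k) hp)
    · rw [dif_neg h]
      refine ⟨h5, h6, h7, ?_⟩
      intro k hk hk2 hp
      by_cases hkl : k < low
      · exact absurd (h8 k (by omega) hkl hp) (by omega)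
      · exact h9 k (by omega) hk2 hp

theorem mgalBLoop_isAns (l r : Int) :
    ∀ (n : Nat) (k res : Int), (44723 - k).toNat = n →
      1 ≤ k → k ≤ 44723 →
      ((k = 1 ∧ res = 1) ∨ (2 ≤ k ∧ res = k - 1)) →
      (∀ j, 1 ≤ j → j < k → mgalP l r j) →
      mgalIsAns l r (mgalBLoop l r k res) := by
  intro n
  induction n using Nat.strong_induction_on with
  | _ n ih =>
    intro k res hn h1 h2 h3 h4
    rw [mgalBLoop]
    by_cases h : k ≤ 44722 ∧ l + PySem.Int.floordiv ((k - 1) * k) 2 ≤ r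
    · rw [dif_pos h]
      refine ih ((44723 - (k + 1)).toNat) (by omega) (k + 1) k rfl (by omega) (by omega)
        (by omega) ?_
      intro j hj1 hjk
      by_cases hj : j < k
      · exact h4 j hj1 hj
      · have : j = k := by omega
        subst this
        exact h.2
    · rw [dif_neg h]
      rcases h3 with ⟨hk1, hres⟩ | ⟨hk2, hres⟩
      · -- k = 1, res = 1: the very first test failed, so no length fits at all
        subst hk1
        have hnp : ¬ mgalP l r 1 := by
          unfold mgalP; intro hp; exact h ⟨by omega, hp⟩
        refine ⟨by omega, by omega, Or.inr hres, ?_⟩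
        intro j hj hj2 hp
        exact hnp (mgalP_mono (by omega) (by omega : (1:Int) ≤ j) hp)
      · refine ⟨by omega, by omega, Or.inl (hres ▸ h4 (k - 1) (by omega) (by omega)), ?_⟩
        intro j hj hj2 hp
        have hk44 : k ≤ 44722 := by omega
        have hnp : ¬ mgalP l r k := fun hpk => h ⟨hk44, hpk⟩
        exact hnp (mgalP_mono (by omega) (by omega : k ≤ j) hp)

-- ===== VERDICT (by name: the statement is the Claim_ definition above) =====
theorem max_good_array_length_spec : Claim_equal_max_good_array_length := by
  intro l r _
  unfold Spec_max_good_array_length max_good_array_length max_good_array_length_alt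
  have hA := mgalALoop_isAns l r ((44722:Int) + 1 - 1).toNat 1 44722 1 rfl (by omega) (by omega)
    (by omega) (by omega) (by omega) (by omega) (Or.inr rfl)
    (by intro k hk1 hk2 hp; omega) (by intro k hk hk2 hp; omega)
  have hB := mgalBLoop_isAns l r ((44723:Int) - 1).toNat 1 1 rfl (by omega) (by omega)
    (Or.inl ⟨rfl, rfl⟩) (by intro j hj1 hj2; omega)
  exact mgalIsAns_unique hA hB
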